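-- pv_equiv track=rewrite | github.com/ishanasse/iStockSoftware | functions_BE_with_UI.py | get_final_tickers_list
-- ===== SOURCE A (Python) =====
-- def validate_ticker(ticker: str):
-- # Function used to validate each ticker provided by the user. Conditions to check:
-- # i.   Not greater than 8 characters II
-- # ii.  No use of numbers or symbols
-- # iii. No more than 2 DOTs
-- # iv. No more than 2 DOTs
--
--     if ticker=="":
--         return False
--     if len(ticker) > 8:
--         return False
--     for char in ticker:
--         if not(char.isalpha() or char=="."):
--             return False
--     if ticker.count(".")>2:
--         return False
--     return True
--
-- def get_final_tickers_list(user_tickers_list: list):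
--     #Define variables for the function
--     #ticker_alias_list=["stock5", "stock4", "stock3", "stock2", "stock1"]
--     default_tickers_list=["PXT.TO", "HUBS", "PING", "BNS.TO", "AAPL", "CRM", "WORK", "BB.TO", "SU.TO", "SAIL"]
--     final_tickers_list=[]
--     #final_tickers_dict={}
--     for ticker in user_tickers_list:
--         ticker=ticker.upper()
--         if validate_ticker(ticker):
--             final_tickers_list.append(ticker)
--             if (ticker in default_tickers_list):
--                 default_tickers_list.remove(ticker)
--             #if (ticker.upper() in default_tickers_list): default_tickers_list.remove(ticker.upper())
--     while len(final_tickers_list) < 5: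
--         final_tickers_list.append(default_tickers_list.pop())
--     return final_tickers_list
-- ===== SOURCE B (Python) =====
-- DEFAULT_TICKERS = ["PXT.TO", "HUBS", "PING", "BNS.TO", "AAPL", "CRM", "WORK", "BB.TO", "SU.TO", "SAIL"]
--
-- def validate_ticker(ticker: str):
--     # single pass: count dots while checking characters, instead of a char loop plus count()
--     if not (1 <= len(ticker) <= 8):
--         return False
--     dots = 0
--     for c in ticker:
--         if c == ".":
--             dots += 1
--         elif not c.isalpha():
--             return False
--     return dots <= 2
--
-- def get_final_tickers_list(user_tickers_list: list):
--     final = [t for t in map(str.upper, user_tickers_list) if validate_ticker(t)]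
--     # pad by a single back-to-front scan of the immutable default list, skipping
--     # tickers already present; the defaults are never copied or mutated
--     for d in reversed(DEFAULT_TICKERS):
--         if len(final) >= 5:
--             break
--         if d not in final:
--             final.append(d)
--     return final
-- ===== Notes on version B (the rewrite author's own statement) =====
-- stated objective: simpler
-- what changed: Validation becomes a single pass carrying a dot counter (A loops over chars and then makes a second count('.') pass), and padding becomes one back-to-front skip-scan of the immutable default list (A mutates the defaults with membership+remove inside the loop and then pops from the shrinking list in a while loop).
import Mathlib
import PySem

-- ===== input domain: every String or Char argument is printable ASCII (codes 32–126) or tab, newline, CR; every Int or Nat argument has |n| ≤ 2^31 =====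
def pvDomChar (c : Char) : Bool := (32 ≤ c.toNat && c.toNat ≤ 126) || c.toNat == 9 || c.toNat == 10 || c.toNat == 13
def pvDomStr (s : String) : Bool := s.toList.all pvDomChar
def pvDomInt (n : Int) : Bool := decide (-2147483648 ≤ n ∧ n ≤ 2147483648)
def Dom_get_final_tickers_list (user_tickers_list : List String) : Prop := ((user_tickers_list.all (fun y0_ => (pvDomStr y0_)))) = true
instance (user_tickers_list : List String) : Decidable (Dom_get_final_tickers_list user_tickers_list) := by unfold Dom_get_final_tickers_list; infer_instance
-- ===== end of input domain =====

-- B validates in one pass with a dot counter (no separate count() pass) and pads by a single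
-- back-to-front skip-scan of the immutable default list (no mutation/remove/pop): simpler decomposition.


-- ===== PORT A =====
def validate_ticker (ticker : String) : Bool :=
  if ticker == "" then false
  else if PySem.Str.len ticker > 8 then false
  else if !(ticker.toList.all (fun c => PySem.Chars.isalpha c || c == '.')) then false
  -- the for-loop with early 'return False' is ported as List.all over the characters
  else if PySem.Str.count ticker "." > 2 then false
  else true

-- the fixed default ticker list (module-level constant in B, local literal in A: same list)
def gflDefaults : List String :=
  ["PXT.TO", "HUBS", "PING", "BNS.TO", "AAPL", "CRM", "WORK", "BB.TO", "SU.TO", "SAIL"]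

-- one iteration of A's for-loop; state = (final_tickers_list, default_tickers_list)
def gflStep (st : List String × List String) (ticker : String) : List String × List String :=
  let t := PySem.Str.upper ticker
  if validate_ticker t then
    (st.1 ++ [t],
     if st.2.contains t then
       match PySem.List.remove? st.2 t with
       | some l => l
       | none => st.2
     else st.2)
  else st

-- A's while-loop: append default_tickers_list.pop() while len(final) < 5.
-- The 'none' branch is Python's IndexError on pop from []; it is unreachable from A's
-- actual states (proved via gflPad_eq + the length bound below), so A is total.
def gflPad (final defaults : List String) : List String :=
  if final.length < 5 then
    match PySem.List.pop? defaults (-1) with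
    | some (x, rest) => gflPad (final ++ [x]) rest
    | none => final
  else final
termination_by 5 - final.length
decreasing_by simp; omega

def get_final_tickers_list (user_tickers_list : List String) : List String :=
  let st := user_tickers_list.foldl gflStep ([], gflDefaults)
  gflPad st.1 st.2

-- ===== PORT B =====
-- B's validate_ticker: one pass over the characters carrying a dot counter;
-- 'none' is the early 'return False' of the Python loop body (named step = the loop body)
def vtStep (acc : Option Nat) (c : Char) : Option Nat :=
  match acc with
  | none => none
  | some dots =>
    if c == '.' then some (dots + 1)
    else if PySem.Chars.isalpha c then some dots
    else none

def validate_ticker_alt (t : String) : Bool :=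
  if !(1 ≤ PySem.Str.len t && PySem.Str.len t ≤ 8) then false
  else
    match t.toList.foldl vtStep (some (0 : Nat)) with
    | none => false
    | some dots => dots ≤ 2

-- B's padding loop: scan reversed(DEFAULT_TICKERS) once, break at length 5, skip used tickers
def gflPadB (final : List String) : List String → List String
  | [] => final
  | d :: rest =>
    if 5 ≤ final.length then final
    else gflPadB (if final.contains d then final else final ++ [d]) rest

def get_final_tickers_list_alt (user_tickers_list : List String) : List String :=
  let final := (user_tickers_list.map PySem.Str.upper).filter validate_ticker_alt
  gflPadB final gflDefaults.reverse

-- ===== PRECONDITION & SPEC =====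
def Spec_get_final_tickers_list (user_tickers_list : List String) (out : List String) : Prop := out = get_final_tickers_list_alt user_tickers_list
instance (user_tickers_list : List String) (out : List String) : Decidable (Spec_get_final_tickers_list user_tickers_list out) := by unfold Spec_get_final_tickers_list; infer_instance

-- ===== CLAIM (what is proved, stated in full; the proofs are below) =====
def Claim_equal_get_final_tickers_list : Prop := ∀ (user_tickers_list : List String), Dom_get_final_tickers_list user_tickers_list → Spec_get_final_tickers_list user_tickers_list (get_final_tickers_list user_tickers_list)

-- ===== LEMMAS AND PROOFS =====

-- B's character fold: 'none' (failure) is absorbing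
lemma fold_vtStep_none (cs : List Char) : cs.foldl vtStep none = none := by
  induction cs with
  | nil => rfl
  | cons c t ih => simpa [vtStep] using ih

-- B's character fold computes: all chars alpha-or-dot ⇒ the dot count, else failure
lemma fold_dots (cs : List Char) (d : Nat) :
    cs.foldl vtStep (some d) =
    if cs.all (fun c => PySem.Chars.isalpha c || c == '.') then some (d + cs.count '.') else none := by
  induction cs generalizing d with
  | nil => simp
  | cons c rest ih =>
    rw [List.foldl_cons]
    by_cases hc : c = '.'
    · subst hc
      rw [show vtStep (some d) '.' = some (d + 1) from by simp [vtStep], ih]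
      simp
      split_ifs
      · simp; omega
      · rfl
    · by_cases ha : PySem.Chars.isalpha c
      · rw [show vtStep (some d) c = some d from by simp [vtStep, hc, ha], ih]
        simp [hc, ha]
      · rw [show vtStep (some d) c = none from by simp [vtStep, hc, ha], fold_vtStep_none]
        simp [hc, ha]

-- Str.count with the single-character needle "." is the char count
lemma count_go_dot (cs : List Char) (fuel acc : Nat) (h : cs.length ≤ fuel) :
    PySem.Chars.count.go ['.'] fuel cs acc = acc + cs.count '.' := by
  induction cs generalizing fuel acc with
  | nil => cases fuel <;> simp [PySem.Chars.count.go]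
  | cons c t ih =>
    cases fuel with
    | zero => simp at h
    | succ f =>
      simp only [List.length_cons, Nat.succ_le_succ_iff] at h
      rw [PySem.Chars.count.go]
      by_cases hc : c = '.'
      · subst hc
        simp only [List.isPrefixOf, beq_self_eq_true, Bool.true_and, if_true,
          List.length_singleton, List.drop_succ_cons, List.drop_zero]
        rw [ih f (acc + 1) h, List.count_cons]
        simp; omega
      · have hne : ('.' == c) = false := by simpa using Ne.symm hc
        simp only [List.isPrefixOf, Bool.and_true, hne, Bool.false_eq_true, if_false]
        rw [ih f acc h, List.count_cons]
        simp [hc]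

lemma count_dot (cs : List Char) : PySem.Chars.count cs ['.'] = cs.count '.' := by
  simp [PySem.Chars.count, count_go_dot cs cs.length 0 le_rfl]

lemma validate_eq (t : String) : validate_ticker t = validate_ticker_alt t := by
  unfold validate_ticker validate_ticker_alt
  rw [fold_dots]
  have hcnt : PySem.Str.count t "." = t.toList.count '.' := by
    rw [PySem.Str.count_eq, show ".".toList = ['.'] from by decide]
    exact count_dot t.toList
  have hlen : PySem.Str.len t = (t.toList.length : Int) := by simp
  by_cases he : t = ""
  · subst he; decide
  · have hbe : ¬ ((t == "") = true) := by simpa using he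
    rw [if_neg hbe]
    have hnil : t.toList ≠ [] := by
      intro h
      exact he (String.toList_inj.mp (by simpa using h))
    have hpos : 1 ≤ t.toList.length := List.length_pos_of_ne_nil hnil
    by_cases h8 : t.toList.length ≤ 8
    · rw [if_neg (show ¬ PySem.Str.len t > 8 by rw [hlen]; omega)]
      rw [if_neg (show ¬ ((!(1 ≤ PySem.Str.len t && PySem.Str.len t ≤ 8)) = true) by
        rw [hlen]; simp
        exact ⟨he, by rw [← String.length_toList]; exact h8⟩)]
      by_cases hall : (t.toList.all fun c => PySem.Chars.isalpha c || c == '.') = true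
      · rw [if_neg (show ¬ ((!(t.toList.all fun c => PySem.Chars.isalpha c || c == '.')) = true) by
          simp [hall]), if_pos hall]
        by_cases hc2 : t.toList.count '.' ≤ 2
        · rw [if_neg (show ¬ PySem.Str.count t "." > 2 by rw [hcnt]; omega)]
          simp [hc2]
        · rw [if_pos (show PySem.Str.count t "." > 2 by rw [hcnt]; omega)]
          simp
          omega
      · rw [if_pos (show (!(t.toList.all fun c => PySem.Chars.isalpha c || c == '.')) = true by
          simp [hall]), if_neg hall]
    · rw [if_pos (show PySem.Str.len t > 8 by rw [hlen]; push_cast; omega)]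
      rw [if_pos (show (!(1 ≤ PySem.Str.len t && PySem.Str.len t ≤ 8)) = true by
        rw [hlen]; simp
        exact Or.inr (by rw [← String.length_toList]; omega))]

-- invariant of A's for-loop: final accumulates the validated upper-cased tickers, and the
-- default list stays the filter of its initial (duplicate-free) value by "not used so far"
lemma gflStep_fold_inv (u : List String) (D0 : List String) (hD : D0.Nodup) (F : List String) :
    u.foldl gflStep (F, D0.filter (fun x => !F.contains x)) =
      (F ++ (u.map PySem.Str.upper).filter validate_ticker,
       D0.filter (fun x => !(F ++ (u.map PySem.Str.upper).filter validate_ticker).contains x)) := by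
  induction u generalizing F with
  | nil => simp
  | cons t rest ih =>
    simp only [List.foldl_cons, List.map_cons]
    set s := PySem.Str.upper t with hs
    set d := D0.filter (fun x => !F.contains x) with hd
    by_cases hv : validate_ticker s
    · have hstep : gflStep (F, d) t = (F ++ [s], D0.filter (fun x => !(F ++ [s]).contains x)) := by
        have hdn : d.Nodup := hD.filter _
        simp only [gflStep, ← hs, hv, if_pos]
        by_cases hmem : s ∈ d
        · have hc : d.contains s = true := by simpa using hmem
          rw [hc]
          simp only [if_pos, PySem.List.remove?_eq_some_erase d s hmem, hdn.erase_eq_filter s]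
          simp only [Prod.mk.injEq, true_and, hd, List.filter_filter]
          refine List.filter_congr ?_
          intro x _
          by_cases hxs : x = s <;> by_cases hxF : x ∈ F <;>
            simp [List.contains_eq_mem, hxs, hxF]
        · have hc : d.contains s = false := by simpa using hmem
          rw [hc]
          simp only [Bool.false_eq_true, if_false, Prod.mk.injEq, true_and, hd]
          refine List.filter_congr ?_
          intro x hx
          by_cases hxF : x ∈ F
          · simp [List.contains_eq_mem, hxF]
          · have hxs : x ≠ s := by
              intro hxs; subst hxs
              exact hmem (by simp [hd, List.mem_filter, hx, hxF])
            simp [List.contains_eq_mem, hxF, hxs]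
      rw [hstep, ih (F ++ [s])]
      simp [hv, List.append_assoc]
    · have hstep : gflStep (F, d) t = (F, d) := by
        simp [gflStep, ← hs, hv]
      rw [hstep, hd, ih F]
      simp [hv]

-- A's while-pop loop appends the needed suffix of the reversed remaining defaults
lemma gflPad_eq (F d : List String) (h : 5 ≤ F.length + d.length) :
    gflPad F d = F ++ d.reverse.take (5 - F.length) := by
  by_cases hF : F.length < 5
  · have hd : d ≠ [] := by
      intro hnil; subst hnil; simp at h; omega
    rcases List.eq_nil_or_concat d with hnil | ⟨ds, x, rfl⟩
    · exact absurd hnil hd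
    simp only [List.concat_eq_append]
    rw [gflPad, if_pos hF, PySem.List.pop?_last]
    have hlen : 5 ≤ (F ++ [x]).length + ds.length := by
      simp at h ⊢; omega
    show gflPad (F ++ [x]) ds = F ++ List.take (5 - F.length) (ds ++ [x]).reverse
    rw [gflPad_eq (F ++ [x]) ds hlen]
    have : 5 - F.length = (5 - (F.length + 1)) + 1 := by omega
    simp [this, List.take_succ_cons, List.append_assoc]
  · rw [gflPad, if_neg hF]
    have : 5 - F.length = 0 := by omega
    simp [this]
termination_by 5 - F.length
decreasing_by simp; omega

-- B's skip-scan over a duplicate-free list takes exactly the unused prefix it needs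
lemma gflPadB_eq (R : List String) (F : List String) (hR : R.Nodup) :
    gflPadB F R = F ++ (R.filter (fun x => !F.contains x)).take (5 - F.length) := by
  induction R generalizing F with
  | nil => simp [gflPadB]
  | cons d rest ih =>
    rcases List.nodup_cons.mp hR with ⟨hd, hrest⟩
    by_cases h5 : 5 ≤ F.length
    · have : 5 - F.length = 0 := by omega
      simp [gflPadB, h5, this]
    · by_cases hmem : d ∈ F
      · have hskip : gflPadB F (d :: rest) = gflPadB F rest := by
          simp [gflPadB, h5, hmem]
        rw [hskip, ih F hrest]
        simp [hmem]
      · have hc : F.contains d = false := by simpa using hmem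
        have htake : 5 - F.length = (5 - (F ++ [d]).length) + 1 := by
          simp; omega
        have hfilter : rest.filter (fun x => !(F ++ [d]).contains x) =
            rest.filter (fun x => !F.contains x) := by
          refine List.filter_congr ?_
          intro x hx
          have hxd : x ≠ d := fun h => hd (h ▸ hx)
          simp [List.contains_eq_mem, hxd]
        simp only [gflPadB, h5, hc, Bool.false_eq_true, if_false,
          ih (F ++ [d]) hrest, hfilter, List.filter_cons, Bool.not_false, if_pos]
        simp [htake, List.take_succ_cons, List.append_assoc]

-- the remaining defaults are always numerous enough: at most F.length distinct
-- elements were removed from the 10 duplicate-free defaults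
lemma filter_length_ge (D0 F : List String) (hD : D0.Nodup) :
    D0.length ≤ F.length + (D0.filter (fun x => !F.contains x)).length := by
  have hsplit := List.length_eq_length_filter_add (l := D0) (fun x => F.contains x)
  have hsub : (D0.filter (fun x => F.contains x)).length ≤ F.length := by
    refine List.Subperm.length_le (List.Nodup.subperm (hD.filter _) ?_)
    intro x hx
    have := (List.mem_filter.mp hx).2
    simpa [List.contains_eq_mem] using this
  omega

-- ===== VERDICT (by name: the statement is the Claim_ definition above) =====
theorem get_final_tickers_list_spec : Claim_equal_get_final_tickers_list := by
  intro u _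
  unfold Spec_get_final_tickers_list get_final_tickers_list get_final_tickers_list_alt
  have hD : gflDefaults.Nodup := by decide
  have hfold := gflStep_fold_inv u gflDefaults hD []
  simp only [List.nil_append] at hfold
  have hinit : gflDefaults.filter (fun x => !([] : List String).contains x) = gflDefaults := by
    simp
  rw [hinit] at hfold
  set F := (u.map PySem.Str.upper).filter validate_ticker with hF
  have hFalt : (u.map PySem.Str.upper).filter validate_ticker_alt = F := by
    rw [hF]; exact List.filter_congr (fun x _ => (validate_eq x).symm)
  set d := gflDefaults.filter (fun x => !F.contains x) with hd
  have hlen : 5 ≤ F.length + d.length := by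
    have h10 : gflDefaults.length = 10 := by decide
    have hf := filter_length_ge gflDefaults F hD
    rw [← hd] at hf
    omega
  rw [hfold]
  simp only [hFalt]
  rw [gflPad_eq F d hlen, gflPadB_eq gflDefaults.reverse F (by simpa using hD)]
  rw [hd, ← List.filter_reverse]
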